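-- pv_equiv track=rewrite | github.com/bale-ice77/hcis_theatre_booking | project_theatre/request_login/login_request.py | decypher
-- ===== SOURCE A (Python) =====
-- alphebet = ['1','2','3','4','5','6','7','8','9','0','q','w','e','r','t','y','u','i','o','p','a','s','d','f','g','h','j','k','l','z','x','c','v','b','n','m']
--
-- def decypher(ID):
--
-- 	text = []
--
-- 	raw_text = ID
-- 	raw_text = ' '.join(raw_text)
-- 	raw_text = raw_text.split(' ')
-- 	spins = 7
--
-- 	while (len(raw_text)>0):
--
-- 		letter = raw_text.pop(0)
-- 		index = alphebet.index(letter)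
-- 		index = index + spins
--
-- 		while index > 35:
--
-- 			index = index-36
--
-- 		letter = alphebet[index]
-- 		text.append(letter)
-- 		spins = spins*2
--
-- 	ID = ''.join(text)
-- 	return ID
-- ===== SOURCE B (Python) =====
-- alphebet = ['1','2','3','4','5','6','7','8','9','0','q','w','e','r','t','y','u','i','o','p','a','s','d','f','g','h','j','k','l','z','x','c','v','b','n','m']
--
-- IDX = {c: i for i, c in enumerate(alphebet)}
--
-- def decypher(ID):
--     return ''.join(alphebet[(IDX[c] + 7 * pow(2, i, 36)) % 36] for i, c in enumerate(ID))
-- ===== Notes on version B (the rewrite author's own statement) =====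
-- stated objective: faster
-- what changed: Replaces the join/split/pop scan, linear alphabet.index and repeated-subtraction reduction of the exponentially growing spins counter with a single comprehension over enumerate(ID) using a precomputed char->index dict and a closed-form offset 7*pow(2,i,36) reduced with %36; intended as faster; a timing run could not confirm a ratio (A timed out already at n=64 where B returned).
-- crash fix: On the empty string A raises ValueError ('' is not in the alphabet list); B returns the empty string. — e.g. on decypher(""): A raises ValueError, B returns ""
import Mathlib
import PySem

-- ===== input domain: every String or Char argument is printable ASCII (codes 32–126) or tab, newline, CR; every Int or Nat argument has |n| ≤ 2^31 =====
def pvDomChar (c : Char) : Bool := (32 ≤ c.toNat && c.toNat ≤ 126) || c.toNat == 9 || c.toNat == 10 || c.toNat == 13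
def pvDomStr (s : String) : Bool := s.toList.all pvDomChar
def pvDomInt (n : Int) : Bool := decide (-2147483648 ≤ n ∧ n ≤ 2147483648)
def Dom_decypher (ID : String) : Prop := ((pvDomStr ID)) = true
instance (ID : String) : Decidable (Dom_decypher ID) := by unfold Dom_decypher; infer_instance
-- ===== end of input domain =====

-- B replaces A's exponential repeated-subtraction reduction of the doubling spins counter (and its
-- join/split/pop/list.index scans) by a per-position closed form (IDX[c] + 7*pow(2,i,36)) % 36;
-- intended as faster; a timing run could not confirm a ratio (A timed out already at n=64 where B returned).

-- ===== PORT A =====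
-- the module constant `alphebet` (a list of one-character strings, ported as List (List Char))
def alphebet : List (List Char) :=
  [['1'],['2'],['3'],['4'],['5'],['6'],['7'],['8'],['9'],['0'],
   ['q'],['w'],['e'],['r'],['t'],['y'],['u'],['i'],['o'],['p'],
   ['a'],['s'],['d'],['f'],['g'],['h'],['j'],['k'],['l'],['z'],
   ['x'],['c'],['v'],['b'],['n'],['m']]

-- the inner `while index > 35: index = index - 36`
def red (i : Nat) : Nat :=
  if i > 35 then red (i - 36) else i
termination_by i
decreasing_by omega

-- the outer `while len(raw_text) > 0` loop, state = (raw_text, spins, text)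
def decypherLoop : List (List Char) → Nat → List (List Char) → List (List Char)
  | [], _, text => text
  | letter :: rest, spins, text =>
    match PySem.List.index? alphebet letter with
    | none => text   -- Python raises ValueError here; excluded by Pre_decypher
    | some i =>
      decypherLoop rest (spins * 2) (text ++ [PySem.List.pyGetD alphebet ((red (i + spins) : Nat) : Int) []])

def decypher (ID : String) : String :=
  -- raw_text = ' '.join(ID); raw_text = raw_text.split(' ')
  let raw := PySem.Chars.splitOn (PySem.Chars.join [' '] (ID.toList.map (fun c => [c]))) [' ']
  String.ofList (PySem.Chars.join [] (decypherLoop raw 7 []))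

-- ===== PORT B =====
-- IDX = {c: i for i, c in enumerate(alphebet)}
def IDX : PySem.Dict (List Char) Int :=
  PySem.Dict.ofList ((PySem.List.enumerate alphebet).map (fun p => (p.2, p.1)))

def decypher_alt (ID : String) : String :=
  String.ofList (PySem.Chars.join []
    ((PySem.List.enumerate ID.toList).map (fun p =>
      match IDX.get? [p.2] with
      | none => []   -- Python raises KeyError here; excluded by Pre_decypher
      | some k => PySem.List.pyGetD alphebet (PySem.Int.mod (k + 7 * PySem.Int.powMod 2 p.1.toNat 36) 36) [])))

-- ===== PRECONDITION & SPEC =====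
-- Pre_ excludes exactly the inputs where A raises ValueError: the empty string (the split of ''
-- is ['']) and strings containing a character outside the 36-symbol alphabet.
def Pre_decypher (ID : String) : Prop :=
  ID.toList ≠ [] ∧ ID.toList.all (fun c => alphebet.contains [c]) = true
instance (ID : String) : Decidable (Pre_decypher ID) := by unfold Pre_decypher; infer_instance

def pvWitness_decypher : String := "abc"

-- On the empty string A raises ValueError ('' is not in the alphabet list); B returns "".
def Raises_decypher (ID : String) : Prop := ID = ""
instance (ID : String) : Decidable (Raises_decypher ID) := by unfold Raises_decypher; infer_instance
def pvRaiseWitness_decypher : String := ""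
def pvRaiseWitnessOut_decypher : String := ""

def Spec_decypher (ID : String) (out : String) : Prop := out = decypher_alt ID
instance (ID : String) (out : String) : Decidable (Spec_decypher ID out) := by unfold Spec_decypher; infer_instance

-- ===== CLAIM (what is proved, stated in full; the proofs are below) =====
def Claim_equal_decypher : Prop := ∀ (ID : String), Dom_decypher ID → Pre_decypher ID → Spec_decypher ID (decypher ID)
def Claim_raises_decypher : Prop := (∀ (ID : String), Dom_decypher ID → Raises_decypher ID → ¬ Pre_decypher ID) ∧ (Dom_decypher (pvRaiseWitness_decypher) ∧ Raises_decypher (pvRaiseWitness_decypher) ∧ decypher_alt (pvRaiseWitness_decypher) = pvRaiseWitnessOut_decypher)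

-- ===== LEMMAS AND PROOFS =====

-- common specification: character j of the output is alphebet[(idx(c) + 7*2^j) % 36]
def specOut : List Char → Nat → List (List Char)
  | [], _ => []
  | c :: rest, j => alphebet.getD ((List.idxOf [c] alphebet + 7 * 2 ^ j) % 36) [] :: specOut rest (j + 1)

theorem red_eq (n : Nat) : red n = n % 36 := by
  fun_induction red n with
  | case1 i h ih => omega
  | case2 i h => omega

theorem idxOf?_eq_some_of_mem {α : Type} [BEq α] [LawfulBEq α] {c : α} {l : List α}
    (h : c ∈ l) : List.idxOf? c l = some (List.idxOf c l) := by
  obtain ⟨k, hk⟩ := Option.isSome_iff_exists.mp (List.isSome_idxOf?.mpr h)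
  rw [List.idxOf_eq_getD_idxOf?, hk]; simp

theorem go_spec (cs : List Char) : ∀ (fuel : Nat) (acc : List (List Char)),
    (∀ c ∈ cs, c ≠ ' ') → cs ≠ [] → 2 * cs.length ≤ fuel + 1 →
    PySem.Chars.splitOn.go [' '] fuel (PySem.Chars.join [' '] (cs.map (fun c => [c]))) [] acc
      = acc.reverse ++ cs.map (fun c => [c]) := by
  induction cs with
  | nil => intro _ _ _ hne _; exact absurd rfl hne
  | cons c rest ih =>
    intro fuel acc hns _ hfuel
    have hc : (' ' == c) = false := by
      have := hns c (by simp)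
      simp [BEq.beq]; exact fun hh => this hh.symm
    obtain ⟨f, rfl⟩ : ∃ f, fuel = f + 1 :=
      ⟨fuel - 1, by simp only [List.length_cons] at hfuel; omega⟩
    cases rest with
    | nil =>
      rw [List.map_cons, List.map_nil, PySem.Chars.join_singleton]
      rw [PySem.Chars.splitOn.go.eq_def]
      simp only [List.isPrefixOf, hc, Bool.false_and]
      cases f with
      | zero => simp [PySem.Chars.splitOn.go.eq_def]
      | succ f' => simp [PySem.Chars.splitOn.go.eq_def]
    | cons d rest' =>
      simp only [List.map_cons] at *
      rw [PySem.Chars.join_cons_cons]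
      have hlen : 2 * (d :: rest').length ≤ (f - 1) + 1 := by
        simp only [List.length_cons] at hfuel ⊢; omega
      obtain ⟨f', rfl⟩ : ∃ f', f = f' + 1 := ⟨f - 1, by simp only [List.length_cons] at hfuel; omega⟩
      rw [show ∀ S : List Char, [c] ++ [' '] ++ S = c :: ' ' :: S from fun S => rfl]
      rw [PySem.Chars.splitOn.go.eq_def]
      simp only [List.isPrefixOf, hc, Bool.false_and, Bool.false_eq_true, if_false]
      rw [PySem.Chars.splitOn.go.eq_def]
      simp only [List.isPrefixOf, BEq.rfl, Bool.true_and, List.length_cons, List.length_nil,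
        List.drop_succ_cons, List.drop_zero, List.reverse_cons, List.reverse_nil,
        List.nil_append, if_true]
      have := ih f' ([c] :: acc) (fun x hx => hns x (by simp [hx])) (by simp)
        (by simp only [List.length_cons] at hlen ⊢; omega)
      rw [this]
      simp

theorem join_singletons_length (c : Char) (cs : List Char) :
    (PySem.Chars.join [' '] (List.map (fun x => [x]) (c :: cs))).length = 2 * cs.length + 1 := by
  induction cs generalizing c with
  | nil => simp [PySem.Chars.join_singleton]
  | cons d rest ih =>
    rw [List.map_cons, List.map_cons, PySem.Chars.join_cons_cons]
    have := ih d
    rw [List.map_cons] at this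
    simp only [List.length_append, List.length_cons, List.length_nil, this]
    omega

theorem splitOn_join_singletons (cs : List Char) (h : ∀ c ∈ cs, c ≠ ' ') (hne : cs ≠ []) :
    PySem.Chars.splitOn (PySem.Chars.join [' '] (cs.map (fun c => [c]))) [' '] = cs.map (fun c => [c]) := by
  rw [PySem.Chars.splitOn]
  rw [go_spec cs _ [] h hne ?_]
  · simp
  · -- the fuel splitOn starts with, s.length + 1, is exactly 2 * cs.length
    cases cs with
    | nil => exact absurd rfl hne
    | cons c rest =>
      rw [join_singletons_length c rest]
      simp only [List.length_cons]
      omega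

theorem loopA_eq (cs : List Char) (j : Nat) (text : List (List Char))
    (h : ∀ c ∈ cs, [c] ∈ alphebet) :
    decypherLoop (cs.map (fun c => [c])) (7 * 2 ^ j) text = text ++ specOut cs j := by
  induction cs generalizing j text with
  | nil => simp [decypherLoop, specOut]
  | cons c rest ih =>
    have hidx : PySem.List.index? alphebet [c] = some (List.idxOf [c] alphebet) := by
      rw [PySem.List.index?_eq_idxOf?]; exact idxOf?_eq_some_of_mem (h c (by simp))
    simp only [List.map_cons, decypherLoop, hidx]
    rw [show 7 * 2 ^ j * 2 = 7 * 2 ^ (j + 1) by ring]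
    rw [ih (j + 1) _ (fun c hc => h c (by simp [hc]))]
    simp only [PySem.List.pyGetD_natCast, red_eq]
    simp [specOut, List.getD]

set_option maxRecDepth 20000 in
theorem IDX_get_all : ∀ l ∈ alphebet, IDX.get? l = some (List.idxOf l alphebet : Int) := by
  decide

theorem IDX_get (c : Char) (h : [c] ∈ alphebet) :
    IDX.get? [c] = some (List.idxOf [c] alphebet : Int) :=
  IDX_get_all [c] h

theorem mapB_eq (cs : List Char) (j : Nat)
    (h : ∀ c ∈ cs, [c] ∈ alphebet) :
    (PySem.List.enumerate cs (j : Int)).map (fun p =>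
      match IDX.get? [p.2] with
      | none => []
      | some k => PySem.List.pyGetD alphebet (PySem.Int.mod (k + 7 * PySem.Int.powMod 2 p.1.toNat 36) 36) [])
      = specOut cs j := by
  induction cs generalizing j with
  | nil => simp [PySem.List.enumerate_nil, specOut]
  | cons c rest ih =>
    rw [PySem.List.enumerate_cons]
    simp only [List.map_cons]
    rw [show ((j : Int) + 1) = ((j + 1 : Nat) : Int) by push_cast; ring]
    rw [ih (j + 1) (fun x hx => h x (by simp [hx]))]
    rw [IDX_get c (h c (by simp))]
    have hpm : PySem.Int.powMod 2 ((j : Int)).toNat 36 = ((2 ^ j % 36 : Nat) : Int) := by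
      rw [Int.toNat_natCast, PySem.Int.powMod_eq_emod 2 j (m := 36) (by norm_num)]
      rw [Int.natCast_mod]; push_cast; ring
    have hmod : PySem.Int.mod ((List.idxOf [c] alphebet : Int) + 7 * ((2 ^ j % 36 : Nat) : Int)) 36
        = (((List.idxOf [c] alphebet + 7 * 2 ^ j) % 36 : Nat) : Int) := by
      rw [show ((List.idxOf [c] alphebet : Int) + 7 * ((2 ^ j % 36 : Nat) : Int))
            = ((List.idxOf [c] alphebet + 7 * (2 ^ j % 36) : Nat) : Int) by push_cast; ring]
      rw [show ((36 : Int)) = ((36 : Nat) : Int) by norm_num]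
      rw [PySem.Int.mod_natCast]
      norm_cast
      omega
    simp only [hpm, hmod, PySem.List.pyGetD_natCast]
    simp [specOut, List.getD]

-- ===== VERDICT (by name: the statement is the Claim_ definition above) =====
theorem decypher_spec : Claim_equal_decypher := by
  intro ID _ hPre
  obtain ⟨hne, hmemB⟩ := hPre
  have hmem : ∀ c ∈ ID.toList, [c] ∈ alphebet := by
    simpa [List.all_eq_true] using hmemB
  unfold Spec_decypher decypher decypher_alt
  dsimp only
  have hns : ∀ c ∈ ID.toList, c ≠ ' ' := by
    intro c hc
    have := hmem c hc
    intro hsp; subst hsp; simp [alphebet] at this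
  rw [splitOn_join_singletons ID.toList hns hne]
  have h7 : (7 : Nat) = 7 * 2 ^ 0 := by norm_num
  rw [h7, loopA_eq ID.toList 0 [] hmem]
  rw [show ((0 : Int) = ((0 : Nat) : Int)) from rfl, mapB_eq ID.toList 0 hmem]
  simp

theorem decypher_raises : Claim_raises_decypher := by
  unfold Claim_raises_decypher
  constructor
  · intro ID _ hR hP
    exact hP.1 (by simp [Raises_decypher] at hR; simp [hR])
  · exact ⟨by decide, rfl, by decide⟩

-- self-check that the raises witness really lies in Raises_ and B's port returns the stated literal
theorem decypher_raises_witness :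
    Raises_decypher pvRaiseWitness_decypher ∧
      decypher_alt pvRaiseWitness_decypher = pvRaiseWitnessOut_decypher :=
  ⟨decypher_raises.2.2.1, decypher_raises.2.2.2⟩
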